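-- pv_equiv track=rewrite | github.com/goulysj/aws | algorithm/w3/minCut/minCut/minCut.py | pickitem
-- ===== SOURCE A (Python) =====
-- def pickitem (ajlist, randomNO):
--     totalNO=randomNO
--     for index,item in enumerate(list(ajlist.keys())):
--         NO= len(ajlist[item])
--         if totalNO >NO:
--             totalNO -= NO
--         else:
--             return (item,ajlist[item][totalNO-1])
-- ===== SOURCE B (Python) =====
-- def pickitem(ajlist, randomNO):
--     keys = list(ajlist.keys())
--     cums = []
--     t = 0
--     for k in keys:
--         t += len(ajlist[k])
--         cums.append(t)
--     prev = 0
--     for k, c in zip(keys, cums):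
--         if randomNO <= c:
--             return (k, ajlist[k][randomNO - prev - 1])
--         prev = c
--     return None
-- ===== Notes on version B (the rewrite author's own statement) =====
-- stated objective: alternative
-- what changed: B precomputes a cumulative-count prefix table over the dict's keys in one pass, then locates the first key whose cumulative count reaches randomNO, instead of A's destructive subtract-as-you-go scan.
import Mathlib
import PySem

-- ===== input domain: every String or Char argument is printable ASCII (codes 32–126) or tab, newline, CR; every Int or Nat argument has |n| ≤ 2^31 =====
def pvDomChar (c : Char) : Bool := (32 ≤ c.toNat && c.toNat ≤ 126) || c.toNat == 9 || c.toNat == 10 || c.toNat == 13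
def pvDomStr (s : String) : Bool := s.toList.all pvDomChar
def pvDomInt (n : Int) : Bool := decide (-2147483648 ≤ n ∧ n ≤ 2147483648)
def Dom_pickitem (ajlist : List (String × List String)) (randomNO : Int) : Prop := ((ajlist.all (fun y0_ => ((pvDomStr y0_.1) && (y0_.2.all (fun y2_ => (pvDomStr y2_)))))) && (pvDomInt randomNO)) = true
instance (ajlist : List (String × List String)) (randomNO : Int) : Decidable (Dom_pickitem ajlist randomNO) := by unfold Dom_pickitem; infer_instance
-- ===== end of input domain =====

-- B replaces A's subtract-as-you-go loop by a prefix-sum table plus a locate pass (alternative decomposition, same cost).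
-- ===== PORT A =====
-- A's loop over list(ajlist.keys()) with the running remainder totalNO.
def pickAGo (d : PySem.Dict String (List String)) : List String → Int → Option (String × String)
  | [], _ => none
  | k :: rest, totalNO =>
    let NO : Int := ((d.getD k []).length : Int)
    if totalNO > NO then pickAGo d rest (totalNO - NO)
    else (PySem.List.pyGet? (d.getD k []) (totalNO - 1)).map (fun v => (k, v))

def pickitem (ajlist : List (String × List String)) (randomNO : Int) : Option (String × String) :=
  let d := PySem.Dict.ofList ajlist
  pickAGo d d.keys randomNO

-- ===== PORT B =====
-- first pass of Source B: build the cumulative-count list cums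
def cumsB (d : PySem.Dict String (List String)) (keys : List String) : List Int :=
  (keys.foldl (fun (p : List Int × Int) k =>
      let t := p.2 + ((d.getD k []).length : Int)
      (p.1 ++ [t], t)) ([], 0)).1

-- second pass of Source B: scan zip(keys, cums) carrying prev
def pickBGo (d : PySem.Dict String (List String)) : List (String × Int) → Int → Int → Option (String × String)
  | [], _, _ => none
  | (k, c) :: rest, prev, randomNO =>
    if randomNO ≤ c then (PySem.List.pyGet? (d.getD k []) (randomNO - prev - 1)).map (fun v => (k, v))
    else pickBGo d rest c randomNO

def pickitem_alt (ajlist : List (String × List String)) (randomNO : Int) : Option (String × String) :=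
  let d := PySem.Dict.ofList ajlist
  pickBGo d (d.keys.zip (cumsB d d.keys)) 0 randomNO

-- ===== PRECONDITION & SPEC =====
-- Pre_ excludes exactly the inputs where Python A raises IndexError: randomNO ≤ 0 with a nonempty
-- dict whose first value list is too short for the negative index randomNO - 1 (B's Python raises there too).
def Pre_pickitem (ajlist : List (String × List String)) (randomNO : Int) : Prop :=
  1 ≤ randomNO ∨ ∀ p ∈ ajlist.head?, -(((PySem.Dict.ofList ajlist).getD p.1 []).length : Int) < randomNO
instance (ajlist : List (String × List String)) (randomNO : Int) : Decidable (Pre_pickitem ajlist randomNO) := by unfold Pre_pickitem; infer_instance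
def pvWitness_pickitem : (List (String × List String)) × Int := ([("a", ["x", "y"]), ("b", ["z"])], 3)

def Spec_pickitem (ajlist : List (String × List String)) (randomNO : Int) (out : Option (String × String)) : Prop := out = pickitem_alt ajlist randomNO
instance (ajlist : List (String × List String)) (randomNO : Int) (out : Option (String × String)) : Decidable (Spec_pickitem ajlist randomNO out) := by unfold Spec_pickitem; infer_instance

-- ===== CLAIM (what is proved, stated in full; the proofs are below) =====
def Claim_equal_pickitem : Prop := ∀ (ajlist : List (String × List String)) (randomNO : Int), Dom_pickitem ajlist randomNO → Pre_pickitem ajlist randomNO → Spec_pickitem ajlist randomNO (pickitem ajlist randomNO)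

-- ===== LEMMAS AND PROOFS =====
-- the cumulative sums of the value-list lengths of keys, starting from t
def cumsFrom (d : PySem.Dict String (List String)) : List String → Int → List Int
  | [], _ => []
  | k :: rest, t => (t + ((d.getD k []).length : Int)) :: cumsFrom d rest (t + ((d.getD k []).length : Int))

theorem cumsB_foldl_eq (d : PySem.Dict String (List String)) :
    ∀ (keys : List String) (acc : List Int) (t : Int),
      (keys.foldl (fun (p : List Int × Int) k =>
        let t := p.2 + ((d.getD k []).length : Int)
        (p.1 ++ [t], t)) (acc, t)).1 = acc ++ cumsFrom d keys t := by
  intro keys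
  induction keys with
  | nil => intro acc t; simp [cumsFrom]
  | cons k rest ih =>
    intro acc t
    simp only [List.foldl, cumsFrom, ih, List.append_assoc, List.singleton_append]

theorem cumsB_eq (d : PySem.Dict String (List String)) (keys : List String) :
    cumsB d keys = cumsFrom d keys 0 := by
  unfold cumsB
  simpa using cumsB_foldl_eq d keys [] 0

theorem pickBGo_eq_pickAGo (d : PySem.Dict String (List String)) :
    ∀ (keys : List String) (prev r : Int),
      pickBGo d (keys.zip (cumsFrom d keys prev)) prev r = pickAGo d keys (r - prev) := by
  intro keys
  induction keys with
  | nil => intro prev r; simp [cumsFrom, pickBGo, pickAGo]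
  | cons k rest ih =>
    intro prev r
    simp only [cumsFrom, List.zip_cons_cons, pickBGo, pickAGo]
    by_cases h : r ≤ prev + ((d.getD k []).length : Int)
    · rw [if_pos h, if_neg (by omega)]
    · rw [if_neg h, if_pos (by omega), ih]
      congr 1
      omega

-- ===== VERDICT (by name: the statement is the Claim_ definition above) =====
theorem pickitem_spec : Claim_equal_pickitem := by
  intro ajlist randomNO _ _
  unfold Spec_pickitem pickitem pickitem_alt
  simp only []
  rw [cumsB_eq, pickBGo_eq_pickAGo]
  congr 1
  omega
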